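-- pv_equiv track=rewrite | github.com/DoUntilFalse/wordler | main.py | genStates
-- ===== SOURCE A (Python) =====
-- def guess(guessWord, targetWord):
--     remainLetters = set()
--     gPos = []
--     yPos = []
--     for i, (x, y) in enumerate(zip(guessWord, targetWord)):
--         if x == y:
--             gPos.append(i)
--         else:
--             remainLetters.add(y)
--     for i, x in enumerate(guessWord):
--         if i not in gPos and x in remainLetters:
--             yPos.append(i)
--     return " ".join(map(str, gPos)) + " | " + " ".join(map(str, yPos))
--
-- def genStates(word, words):
--     states = {}
--     for x in words:
--         state = guess(word, x)
--         if state not in states: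
--             states[state] = [x]
--         else:
--             states[state].append(x)
--     return states
-- ===== SOURCE B (Python) =====
-- def guess(guessWord, targetWord):
--     pairs = list(zip(guessWord, targetWord))
--     gPos = [i for i, (x, y) in enumerate(pairs) if x == y]
--     remain = {y for x, y in pairs if x != y}
--     yPos = [i for i, x in enumerate(guessWord) if i not in gPos and x in remain]
--     return " ".join(map(str, gPos)) + " | " + " ".join(map(str, yPos))
--
-- def genStates(word, words):
--     pairs = [(guess(word, x), x) for x in words]
--     keys = list(dict.fromkeys(s for s, _ in pairs))
--     return {k: [x for s, x in pairs if s == k] for k in keys}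
-- ===== Notes on version B (the rewrite author's own statement) =====
-- stated objective: alternative
-- what changed: genStates precomputes all (state, word) pairs once, deduplicates the state keys in first-occurrence order, and builds each group by a per-key filter over the pairs (instead of A's incremental dict-append loop); guess is rewritten as comprehensions instead of accumulator loops.
import Mathlib
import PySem

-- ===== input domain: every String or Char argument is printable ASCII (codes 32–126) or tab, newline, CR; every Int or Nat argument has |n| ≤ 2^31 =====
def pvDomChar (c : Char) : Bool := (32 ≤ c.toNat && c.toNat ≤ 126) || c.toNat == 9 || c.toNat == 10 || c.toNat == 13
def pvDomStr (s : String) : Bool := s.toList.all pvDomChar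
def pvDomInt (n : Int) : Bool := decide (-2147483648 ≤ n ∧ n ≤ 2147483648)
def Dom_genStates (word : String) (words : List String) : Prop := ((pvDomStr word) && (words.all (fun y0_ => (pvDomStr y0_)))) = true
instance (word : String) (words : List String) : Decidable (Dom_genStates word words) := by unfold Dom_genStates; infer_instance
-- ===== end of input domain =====

-- B regroups by precomputing all (state, word) pairs once, deduplicating the state keys, and
-- building each group by a per-key filter (alternative decomposition; same return value).


-- ===== PORT A =====
-- guess: two index loops building gPos/yPos and the set of remaining letters
def guessA (guessWord targetWord : String) : String :=
  let st := (PySem.List.enumerate (guessWord.toList.zip targetWord.toList)).foldl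
      (fun (acc : List Int × PySem.Set Char) p =>
        if p.2.1 == p.2.2 then (acc.1 ++ [p.1], acc.2) else (acc.1, acc.2.add p.2.2))
      ([], PySem.Set.empty)
  let gPos := st.1
  let remainLetters := st.2
  let yPos := (PySem.List.enumerate guessWord.toList).foldl
      (fun acc p => if !(gPos.contains p.1) && remainLetters.contains p.2 then acc ++ [p.1] else acc) []
  PySem.Str.join " " (gPos.map PySem.Int.toStr) ++ " | " ++ PySem.Str.join " " (yPos.map PySem.Int.toStr)

def genStates (word : String) (words : List String) : List (String × List String) :=
  (words.foldl
    (fun (states : PySem.Dict String (List String)) x =>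
      let state := guessA word x
      if !(states.contains state) then states.insert state [x]
      else states.modify state [] (fun v => v ++ [x]))
    PySem.Dict.empty).items

-- ===== PORT B =====
-- guess via comprehensions: gPos/remain/yPos as filter+map over the zipped pairs
def guessB (guessWord targetWord : String) : String :=
  let pairs := guessWord.toList.zip targetWord.toList
  let gPos := ((PySem.List.enumerate pairs).filter (fun p => p.2.1 == p.2.2)).map (·.1)
  let remain := PySem.Set.ofList ((pairs.filter (fun p => !(p.1 == p.2))).map (·.2))
  let yPos := ((PySem.List.enumerate guessWord.toList).filter
      (fun p => !(gPos.contains p.1) && remain.contains p.2)).map (·.1)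
  PySem.Str.join " " (gPos.map PySem.Int.toStr) ++ " | " ++ PySem.Str.join " " (yPos.map PySem.Int.toStr)

def genStates_alt (word : String) (words : List String) : List (String × List String) :=
  let pairs := words.map (fun x => (guessB word x, x))
  let keys := PySem.List.dedup (pairs.map (·.1))
  keys.map (fun k => (k, (pairs.filter (fun p => p.1 == k)).map (·.2)))

-- ===== PRECONDITION & SPEC =====
def Spec_genStates (word : String) (words : List String) (out : List (String × List String)) : Prop := out = genStates_alt word words
instance (word : String) (words : List String) (out : List (String × List String)) : Decidable (Spec_genStates word words out) := by unfold Spec_genStates; infer_instance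

-- ===== CLAIM (what is proved, stated in full; the proofs are below) =====
def Claim_equal_genStates : Prop := ∀ (word : String) (words : List String), Dom_genStates word words → Spec_genStates word words (genStates word words)

-- ===== LEMMAS AND PROOFS =====

-- A's first loop computes B's gPos comprehension and B's remain set
theorem loop1_eq (l : List (Char × Char)) : ∀ (s : Int) (g : List Int) (r : PySem.Set Char),
    (PySem.List.enumerate l s).foldl
      (fun (acc : List Int × PySem.Set Char) p =>
        if p.2.1 == p.2.2 then (acc.1 ++ [p.1], acc.2) else (acc.1, acc.2.add p.2.2))
      (g, r)
    = (g ++ (((PySem.List.enumerate l s).filter (fun p => p.2.1 == p.2.2)).map (·.1)),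
       PySem.Set.update r ((l.filter (fun p => !(p.1 == p.2))).map (·.2))) := by
  induction l with
  | nil => intro s g r; simp [PySem.List.enumerate, PySem.Set.update]
  | cons hd tl ih =>
    intro s g r
    rw [PySem.List.enumerate_cons, List.foldl_cons]
    by_cases h : hd.1 = hd.2
    · have hb : (((s, hd).2.1 == (s, hd).2.2) = true) := by simp [h]
      rw [if_pos hb,
        show ((((g, r).1 ++ [(s, hd).1], (g, r).2)) : List Int × PySem.Set Char) = (g ++ [s], r) from rfl,
        ih]
      simp [h]
    · have hb : ¬(((s, hd).2.1 == (s, hd).2.2) = true) := by simp [h]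
      rw [if_neg hb,
        show ((((g, r).1, (g, r).2.add (s, hd).2.2)) : List Int × PySem.Set Char) = (g, r.add hd.2) from rfl,
        ih]
      simp [h, PySem.Set.update]

theorem guess_eq (g t : String) : guessA g t = guessB g t := by
  simp only [guessA, guessB, loop1_eq, PySem.List.foldl_append_if]
  simp [PySem.Set.update_nil_left]

-- A's branching dict step is the uniform modify step
theorem step_eq_modify (d : PySem.Dict String (List String)) (s : String) (x : String) :
    (if !(d.contains s) then d.insert s [x] else d.modify s [] (fun v => v ++ [x]))
      = d.modify s [] (fun v => v ++ [x]) := by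
  by_cases h : d.contains s
  · simp [h]
  · simp only [Bool.not_eq_true] at h
    simp [h, PySem.Dict.modify, PySem.Dict.getD_of_not_contains]

theorem genStates_spec_aux (word : String) (words : List String) :
    genStates word words = genStates_alt word words := by
  unfold genStates genStates_alt
  simp only [fun x => guess_eq word x]
  have hcongr := PySem.List.foldl_congr_mem
    (l := words) (init := (PySem.Dict.empty : PySem.Dict String (List String)))
    (f := fun states x =>
      if !(states.contains (guessB word x)) then states.insert (guessB word x) [x]
      else states.modify (guessB word x) [] (fun v => v ++ [x]))
    (g := fun d x => d.modify (guessB word x) [] (fun v => v ++ [x]))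
    (fun d x _ => step_eq_modify d _ x)
  rw [hcongr, show (words.foldl (fun (d : PySem.Dict String (List String)) x =>
        d.modify (guessB word x) [] (fun v => v ++ [x])) PySem.Dict.empty)
      = ((words.map (fun x => (guessB word x, x))).foldl
          (fun d p => d.modify p.1 [] (fun v => v ++ [p.2])) PySem.Dict.empty)
    from (List.foldl_map (f := fun x => (guessB word x, x))
      (g := fun (d : PySem.Dict String (List String)) p => d.modify p.1 [] (fun v => v ++ [p.2]))
      (l := words) (init := PySem.Dict.empty)).symm]
  set l := words.map (fun x => (guessB word x, x)) with hl
  have hnd : (l.foldl (fun (d : PySem.Dict String (List String)) p =>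
      d.modify p.1 [] (fun v => v ++ [p.2])) PySem.Dict.empty).keys.Nodup :=
    PySem.Dict.nodup_keys_foldl_modify_key l (·.1) [] (fun d p v => v ++ [p.2])
      PySem.Dict.empty (by simp)
  rw [PySem.Dict.items_eq_map_keys _ hnd []]
  have hkeys : (l.foldl (fun (d : PySem.Dict String (List String)) p =>
      d.modify p.1 [] (fun v => v ++ [p.2])) PySem.Dict.empty).keys
      = PySem.Set.ofList (l.map (·.1)) := by
    rw [PySem.Dict.keys_foldl_modify_key l (·.1) [] (fun d p v => v ++ [p.2])]
    simp [PySem.Set.update_nil_left]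
  rw [hkeys, PySem.List.dedup_eq_ofList]
  apply List.map_congr_left
  intro k _
  rw [PySem.Dict.getD_foldl_modify_append l PySem.Dict.empty k]
  simp

-- ===== VERDICT (by name: the statement is the Claim_ definition above) =====
theorem genStates_spec : Claim_equal_genStates := by
  intro word words _
  exact genStates_spec_aux word words
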